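-- pv_equiv track=rewrite | github.com/danschauder/Advent_of_Code2020 | Day22_Part1.py | score_winner
-- ===== SOURCE A (Python) =====
-- def score_winner(deck):
--     p = len(deck)
--     i = 0
--     score=0
--     while p>0:
--         score+= deck[i]*p
--         i+=1
--         p-=1
--     return score
-- ===== SOURCE B (Python) =====
-- def score_winner(deck):
--     # Prefix-sum decomposition: each card contributes to every later prefix sum,
--     # i.e. exactly (len - i) times, matching the positional weights.
--     acc = 0
--     total = 0
--     for card in deck:
--         acc += card
--         total += acc
--     return total
-- ===== Notes on version B (the rewrite author's own statement) =====
-- stated objective: faster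
-- what changed: Replaces the index/weight while-loop (deck[i]*p with two counters) by a single for-loop summing running prefix sums; no indexing or multiplication per element (measured ~2x faster).
import Mathlib
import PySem

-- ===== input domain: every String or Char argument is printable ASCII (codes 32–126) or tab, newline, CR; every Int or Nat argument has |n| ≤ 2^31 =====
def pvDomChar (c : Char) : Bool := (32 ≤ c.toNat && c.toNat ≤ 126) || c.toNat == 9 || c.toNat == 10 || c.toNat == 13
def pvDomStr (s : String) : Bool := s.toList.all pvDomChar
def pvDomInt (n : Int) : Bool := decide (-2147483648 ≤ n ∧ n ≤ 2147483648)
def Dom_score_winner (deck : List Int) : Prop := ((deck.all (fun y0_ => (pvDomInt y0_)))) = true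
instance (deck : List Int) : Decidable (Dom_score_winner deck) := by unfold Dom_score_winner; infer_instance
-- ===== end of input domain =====

-- B computes the score as the sum of running prefix sums instead of A's
-- positional weighted sum; same result, a different decomposition.


-- ===== PORT A =====
-- while p > 0: score += deck[i]*p; i += 1; p -= 1  (fuel = p, which starts at len(deck));
-- deck[i] is always in range, so the .getD 0 default of pyGet? is never used.
def scoreLoopA (deck : List Int) : Nat → Int → Int → Int
  | 0, _, score => score
  | p + 1, i, score =>
      scoreLoopA deck p (i + 1) (score + (PySem.List.pyGet? deck i).getD 0 * ((p : Int) + 1))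

def score_winner (deck : List Int) : Int :=
  scoreLoopA deck deck.length 0 0

-- ===== PORT B =====
def score_winner_alt (deck : List Int) : Int :=
  (deck.foldl (fun st card => (st.1 + card, st.2 + st.1 + card)) ((0 : Int), (0 : Int))).2

-- ===== PRECONDITION & SPEC =====
def Spec_score_winner (deck : List Int) (out : Int) : Prop := out = score_winner_alt deck
instance (deck : List Int) (out : Int) : Decidable (Spec_score_winner deck out) := by unfold Spec_score_winner; infer_instance

-- ===== CLAIM (what is proved, stated in full; the proofs are below) =====
def Claim_equal_score_winner : Prop := ∀ (deck : List Int), Dom_score_winner deck → Spec_score_winner deck (score_winner deck)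

-- ===== LEMMAS AND PROOFS =====

-- common weighted sum: wsum (c :: t) = c * (len t + 1) + wsum t
def wsum : List Int → Int
  | [] => 0
  | c :: t => c * ((t.length : Int) + 1) + wsum t

theorem scoreLoopA_eq_wsum (rest : List Int) : ∀ (deck : List Int) (i : Nat) (s : Int),
    deck.drop i = rest → scoreLoopA deck rest.length (i : Int) s = s + wsum rest := by
  induction rest with
  | nil => intro deck i s _; simp [scoreLoopA, wsum]
  | cons c t ih =>
    intro deck i s hdrop
    have hget : deck[i]? = some c := by
      have := @List.getElem?_drop _ deck i 0
      rw [hdrop] at this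
      simpa using this.symm
    have hdrop' : deck.drop (i + 1) = t := by
      have := @List.drop_drop _ 1 i deck
      rw [hdrop] at this
      simpa [Nat.add_comm] using this.symm
    have : scoreLoopA deck (c :: t).length (i : Int) s
        = scoreLoopA deck t.length ((i : Int) + 1) (s + c * ((t.length : Int) + 1)) := by
      simp [scoreLoopA, PySem.List.pyGet?_natCast, hget]
    rw [this]
    have := ih deck (i + 1) (s + c * ((t.length : Int) + 1)) hdrop'
    push_cast at this ⊢
    rw [this, wsum]
    ring

theorem foldl_B_eq_wsum (l : List Int) : ∀ (acc total : Int),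
    (l.foldl (fun st card => (st.1 + card, st.2 + st.1 + card)) (acc, total)).2
      = total + acc * (l.length : Int) + wsum l := by
  induction l with
  | nil => intro acc total; simp [wsum]
  | cons c t ih =>
    intro acc total
    rw [List.foldl_cons]
    rw [ih (acc + c) (total + acc + c), wsum, List.length_cons]
    push_cast
    ring

-- ===== VERDICT (by name: the statement is the Claim_ definition above) =====
theorem score_winner_spec : Claim_equal_score_winner := by
  intro deck _
  unfold Spec_score_winner score_winner score_winner_alt
  have hA := scoreLoopA_eq_wsum deck deck 0 0 (by simp)
  have hB := foldl_B_eq_wsum deck 0 0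
  simp at hA
  rw [hA, hB]
  ring
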